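-- pv_equiv track=rewrite | github.com/ralshut/LLM_Notebooks | finetuning_k_2/scripts/chat_lora.py | build_manual_prompt_mistral
-- ===== SOURCE A (Python) =====
-- from typing import List, Tuple, Optional
--
-- def build_manual_prompt_mistral(
--     conversation: List[dict],
--     system_prompt: Optional[str],
--     use_history: bool,
-- ) -> str:
--     """
--     Baut Mistral-Format mit oder ohne History
--     """
--     if not use_history:
--         # Nur letzte User-Message
--         last_user = None
--         for turn in reversed(conversation):
--             if turn["role"] == "user":
--                 last_user = turn["content"]
--                 break
--
--         if system_prompt:
--             return f"<s>[INST] {system_prompt}\n{last_user} [/INST]"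
--         return f"<s>[INST] {last_user} [/INST]"
--
--     # Mit History: alle Turns einbauen
--     prompt_parts: List[str] = []
--     conv_wo_system = [turn for turn in conversation if turn["role"] != "system"]
--
--     i = 0
--     first_turn = True
--     while i < len(conv_wo_system):
--         if conv_wo_system[i]["role"] == "user":
--             user_text = conv_wo_system[i]["content"]
--
--             # Erste User-Message: System Prompt mit einbauen
--             if first_turn and system_prompt:
--                 prompt_parts.append(f"<s>[INST] {system_prompt}\n{user_text} [/INST]")
--                 first_turn = False
--             else:
--                 prompt_parts.append(f"<s>[INST] {user_text} [/INST]")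
--
--             # Checke ob Assistant-Antwort folgt
--             if i + 1 < len(conv_wo_system) and conv_wo_system[i + 1]["role"] == "assistant":
--                 prompt_parts.append(f" {conv_wo_system[i + 1]['content']}</s>")
--                 i += 2
--             else:
--                 # Letzte User-Message ohne Antwort → offen lassen
--                 i += 1
--         else:
--             i += 1
--
--     return "\n".join(prompt_parts)
-- ===== SOURCE B (Python) =====
-- from typing import List, Tuple, Optional
--
--
-- def build_manual_prompt_mistral(
--     conversation: List[dict],
--     system_prompt: Optional[str],
--     use_history: bool,
-- ) -> str:
--     if not use_history:
--         last_user = next(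
--             (t["content"] for t in reversed(conversation) if t["role"] == "user"),
--             None,
--         )
--         prefix = f"{system_prompt}\n" if system_prompt else ""
--         return f"<s>[INST] {prefix}{last_user} [/INST]"
--
--     # History: one forward pass; `open_inst` tracks whether the previous
--     # non-system turn was a user turn (i.e. an INST block awaiting its answer).
--     parts: List[str] = []
--     open_inst = False
--     first_turn = True
--     for t in conversation:
--         role = t["role"]
--         if role == "system":
--             continue
--         if role == "user":
--             if first_turn and system_prompt:
--                 parts.append(f"<s>[INST] {system_prompt}\n{t['content']} [/INST]")
--                 first_turn = False
--             else:
--                 parts.append(f"<s>[INST] {t['content']} [/INST]")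
--         elif role == "assistant" and open_inst:
--             parts.append(f" {t['content']}</s>")
--         open_inst = role == "user"
--     return "\n".join(parts)
-- ===== Notes on version B (the rewrite author's own statement) =====
-- stated objective: simpler
-- what changed: The history branch's index-juggling while loop with i+1 lookahead and i+=2 skips is replaced by a single forward for-loop state machine carrying an open-INST-block flag, and the no-history reversed scan-with-break by a next()-over-generator; same pairing, dropped stray assistants and consecutive-user behaviour.
import Mathlib
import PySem

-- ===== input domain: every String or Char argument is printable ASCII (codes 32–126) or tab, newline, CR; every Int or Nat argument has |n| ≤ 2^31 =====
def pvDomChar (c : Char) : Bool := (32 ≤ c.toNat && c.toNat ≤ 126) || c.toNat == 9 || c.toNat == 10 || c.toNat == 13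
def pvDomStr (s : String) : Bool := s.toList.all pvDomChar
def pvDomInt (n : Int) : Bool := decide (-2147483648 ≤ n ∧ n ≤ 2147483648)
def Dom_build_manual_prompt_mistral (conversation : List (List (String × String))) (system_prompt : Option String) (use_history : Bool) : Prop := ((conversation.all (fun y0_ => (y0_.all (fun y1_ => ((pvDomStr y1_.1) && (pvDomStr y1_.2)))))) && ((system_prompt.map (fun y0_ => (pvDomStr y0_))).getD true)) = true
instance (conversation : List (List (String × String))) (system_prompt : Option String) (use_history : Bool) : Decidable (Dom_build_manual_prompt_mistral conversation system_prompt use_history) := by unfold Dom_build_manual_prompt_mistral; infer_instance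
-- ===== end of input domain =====

-- B replaces A's index-juggling while loop with lookahead by a single forward
-- fold carrying an "open INST block" flag (objective: simpler decomposition,
-- same O(n) cost). Equivalence is about return values; neither mutates input.

-- shared trivial helpers (turn["k"] lookup = first match, Python truthiness of
-- the optional system prompt, and f-string rendering of a possibly-None value)
def pvGetD (t : List (String × String)) (k : String) : String :=
  (PySem.Dict.mk t).getD k ""
def pvSysTruthy : Option String → Bool
  | some s => !(s == "")
  | none => false
def pvFmtOpt : Option String → String
  | some s => s
  | none => "None"

-- ===== PORT A =====
-- `for turn in reversed(conversation): if … break` of A's no-history branch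
def pvFindLastUser : List (List (String × String)) → Option String
  | [] => none
  | t :: rest =>
    if pvGetD t "role" == "user" then some (pvGetD t "content")
    else pvFindLastUser rest

-- A's while loop over conv_wo_system with the i+1 lookahead and i += 2 skip
def pvLoopA (sys : Option String) : List (List (String × String)) → Bool → List String
  | [], _ => []
  | [t], first =>
    if pvGetD t "role" == "user" then
      [if first && pvSysTruthy sys then
         "<s>[INST] " ++ sys.getD "" ++ "\n" ++ pvGetD t "content" ++ " [/INST]"
       else
         "<s>[INST] " ++ pvGetD t "content" ++ " [/INST]"]
    else []
  | t :: t2 :: rest2, first =>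
    if pvGetD t "role" == "user" then
      let part :=
        if first && pvSysTruthy sys then
          "<s>[INST] " ++ sys.getD "" ++ "\n" ++ pvGetD t "content" ++ " [/INST]"
        else
          "<s>[INST] " ++ pvGetD t "content" ++ " [/INST]"
      let first' := if first && pvSysTruthy sys then false else first
      if pvGetD t2 "role" == "assistant" then
        part :: (" " ++ pvGetD t2 "content" ++ "</s>") :: pvLoopA sys rest2 first'
      else
        part :: pvLoopA sys (t2 :: rest2) first'
    else pvLoopA sys (t2 :: rest2) first

def build_manual_prompt_mistral (conversation : List (List (String × String))) (system_prompt : Option String) (use_history : Bool) : String :=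
  if !use_history then
    let lastUser := pvFindLastUser conversation.reverse
    if pvSysTruthy system_prompt then
      "<s>[INST] " ++ system_prompt.getD "" ++ "\n" ++ pvFmtOpt lastUser ++ " [/INST]"
    else
      "<s>[INST] " ++ pvFmtOpt lastUser ++ " [/INST]"
  else
    let convWoSystem := conversation.filter (fun t => !(pvGetD t "role" == "system"))
    PySem.Str.join "\n" (pvLoopA system_prompt convWoSystem true)

-- ===== PORT B =====
-- B's loop body: state = (parts, open_inst, first_turn)
def pvStepB (sys : Option String) (st : List String × Bool × Bool) (t : List (String × String)) : List String × Bool × Bool :=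
  let role := pvGetD t "role"
  if role == "system" then st
  else
    let parts :=
      if role == "user" then
        st.1 ++ [if st.2.2 && pvSysTruthy sys then
                   "<s>[INST] " ++ sys.getD "" ++ "\n" ++ pvGetD t "content" ++ " [/INST]"
                 else
                   "<s>[INST] " ++ pvGetD t "content" ++ " [/INST]"]
      else if role == "assistant" && st.2.1 then
        st.1 ++ [" " ++ pvGetD t "content" ++ "</s>"]
      else st.1
    let first := if role == "user" && st.2.2 && pvSysTruthy sys then false else st.2.2
    (parts, role == "user", first)

def build_manual_prompt_mistral_alt (conversation : List (List (String × String))) (system_prompt : Option String) (use_history : Bool) : String :=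
  if !use_history then
    let lastUser := (conversation.reverse.find? (fun t => pvGetD t "role" == "user")).map
      (fun t => pvGetD t "content")
    let pfx := if pvSysTruthy system_prompt then system_prompt.getD "" ++ "\n" else ""
    "<s>[INST] " ++ pfx ++ pvFmtOpt lastUser ++ " [/INST]"
  else
    PySem.Str.join "\n" (conversation.foldl (pvStepB system_prompt) ([], false, true)).1

-- ===== PRECONDITION & SPEC =====
abbrev pvHasKey (t : List (String × String)) (k : String) : Prop :=
  ((PySem.Dict.mk t).get? k).isSome = true

-- Pre_ = exactly the inputs where A raises no KeyError: every turn whose "role"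
-- (resp. "content") A actually reads must carry that key — with history: all
-- roles, content of user turns and of assistants directly following a user in
-- the system-filtered list; without history: roles of the turns scanned from
-- the end up to the first user turn and that turn's content.
def Pre_build_manual_prompt_mistral (conversation : List (List (String × String))) (system_prompt : Option String) (use_history : Bool) : Prop :=
  if use_history then
    (∀ t ∈ conversation, pvHasKey t "role") ∧
    (∀ t ∈ conversation, (PySem.Dict.mk t).get? "role" = some "user" → pvHasKey t "content") ∧
    (∀ p ∈ (conversation.filter (fun t => !(pvGetD t "role" == "system"))).zip
           ((conversation.filter (fun t => !(pvGetD t "role" == "system"))).drop 1),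
       (PySem.Dict.mk p.1).get? "role" = some "user" →
       (PySem.Dict.mk p.2).get? "role" = some "assistant" → pvHasKey p.2 "content")
  else
    (∀ t ∈ conversation.reverse.takeWhile
        (fun t => !((PySem.Dict.mk t).get? "role" == some "user")), pvHasKey t "role") ∧
    (∀ t ∈ (conversation.reverse.dropWhile
        (fun t => !((PySem.Dict.mk t).get? "role" == some "user"))).take 1,
       pvHasKey t "content")

instance (conversation : List (List (String × String))) (system_prompt : Option String) (use_history : Bool) : Decidable (Pre_build_manual_prompt_mistral conversation system_prompt use_history) := by
  unfold Pre_build_manual_prompt_mistral; infer_instance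

def pvWitness_build_manual_prompt_mistral : (List (List (String × String))) × Option String × Bool :=
  ([[("role", "user"), ("content", "hi")], [("role", "assistant"), ("content", "yo")]],
   some "sys", true)

def Spec_build_manual_prompt_mistral (conversation : List (List (String × String))) (system_prompt : Option String) (use_history : Bool) (out : String) : Prop := out = build_manual_prompt_mistral_alt conversation system_prompt use_history
instance (conversation : List (List (String × String))) (system_prompt : Option String) (use_history : Bool) (out : String) : Decidable (Spec_build_manual_prompt_mistral conversation system_prompt use_history out) := by unfold Spec_build_manual_prompt_mistral; infer_instance

-- ===== CLAIM (what is proved, stated in full; the proofs are below) =====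
def Claim_equal_build_manual_prompt_mistral : Prop := ∀ (conversation : List (List (String × String))) (system_prompt : Option String) (use_history : Bool), Dom_build_manual_prompt_mistral conversation system_prompt use_history → Pre_build_manual_prompt_mistral conversation system_prompt use_history → Spec_build_manual_prompt_mistral conversation system_prompt use_history (build_manual_prompt_mistral conversation system_prompt use_history)

-- ===== LEMMAS AND PROOFS =====

-- A's reversed-scan-with-break equals B's find?-then-map on the same list
theorem pvFindLastUser_eq_find? (l : List (List (String × String))) :
    pvFindLastUser l =
      (l.find? (fun t => pvGetD t "role" == "user")).map (fun t => pvGetD t "content") := by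
  induction l with
  | nil => rfl
  | cons t rest ih =>
    by_cases h : (pvGetD t "role" == "user") = true
    · simp [pvFindLastUser, List.find?, h]
    · simp only [Bool.not_eq_true] at h
      simp [pvFindLastUser, List.find?, h, ih]

-- B's fold skips system turns, so folding the filtered list is the same
theorem pvFoldB_filter (sys : Option String) (l : List (List (String × String)))
    (st : List String × Bool × Bool) :
    l.foldl (pvStepB sys) st =
      (l.filter (fun t => !(pvGetD t "role" == "system"))).foldl (pvStepB sys) st := by
  induction l generalizing st with
  | nil => rfl
  | cons t rest ih =>
    by_cases h : (pvGetD t "role" == "system") = true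
    · have hstep : pvStepB sys st t = st := by simp [pvStepB, h]
      simp [h, hstep, ih]
    · simp only [Bool.not_eq_true] at h
      simp [h, ih]

-- the open flag is irrelevant when the incoming turn is neither assistant nor system
theorem pvStepB_open_irrel (sys : Option String) (t : List (String × String))
    (p : List String) (f : Bool)
    (ha : ¬ pvGetD t "role" = "assistant") (hs : ¬ pvGetD t "role" = "system") :
    pvStepB sys (p, true, f) t = pvStepB sys (p, false, f) t := by
  by_cases hu : (pvGetD t "role" == "user") = true
  · simp [pvStepB, hu, hs]
  · simp only [beq_iff_eq] at hu
    simp [pvStepB, hu, ha, hs]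

-- main invariant: on a system-free list, B's fold from a closed INST state
-- appends exactly the parts A's lookahead loop emits
theorem pvFoldB_eq_loopA (sys : Option String) :
    ∀ (n : Nat) (l : List (List (String × String))), l.length ≤ n →
    (∀ t ∈ l, ¬ pvGetD t "role" = "system") →
    ∀ (p : List String) (f : Bool),
      (l.foldl (pvStepB sys) (p, false, f)).1 = p ++ pvLoopA sys l f := by
  intro n
  induction n with
  | zero =>
    intro l hlen _ p f
    have : l = [] := List.eq_nil_of_length_eq_zero (Nat.le_zero.mp hlen)
    subst this; simp [pvLoopA]
  | succ n ih =>
    intro l hlen hsys p f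
    match l with
    | [] => simp [pvLoopA]
    | t :: rest =>
      have hts : ¬ pvGetD t "role" = "system" := hsys t (by simp)
      by_cases hu : (pvGetD t "role" == "user") = true
      · -- user turn: B appends the INST part and opens the block
        have hstep : pvStepB sys (p, false, f) t =
            (p ++ [if f && pvSysTruthy sys then
                     "<s>[INST] " ++ sys.getD "" ++ "\n" ++ pvGetD t "content" ++ " [/INST]"
                   else
                     "<s>[INST] " ++ pvGetD t "content" ++ " [/INST]"],
             true, if f && pvSysTruthy sys then false else f) := by
          have hns : ¬ (pvGetD t "role" == "system") = true := by
            simp [beq_iff_eq]; exact hts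
          by_cases hf : (f && pvSysTruthy sys) = true <;>
            simp [pvStepB, hu, hns, hf]
        match rest with
        | [] =>
          simp [List.foldl, hstep, pvLoopA, hu]
        | t2 :: rest2 =>
          by_cases ha : (pvGetD t2 "role" == "assistant") = true
          · -- assistant follows: B closes the block, matching A's i += 2
            have hstep2 : ∀ f', pvStepB sys
                (p ++ [if f && pvSysTruthy sys then
                     "<s>[INST] " ++ sys.getD "" ++ "\n" ++ pvGetD t "content" ++ " [/INST]"
                   else
                     "<s>[INST] " ++ pvGetD t "content" ++ " [/INST]"], true, f') t2 =
                ((p ++ [if f && pvSysTruthy sys then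
                     "<s>[INST] " ++ sys.getD "" ++ "\n" ++ pvGetD t "content" ++ " [/INST]"
                   else
                     "<s>[INST] " ++ pvGetD t "content" ++ " [/INST]"]) ++
                  [" " ++ pvGetD t2 "content" ++ "</s>"], false, f') := by
              intro f'
              have ht2 : pvGetD t2 "role" = "assistant" := by simpa [beq_iff_eq] using ha
              have hns2 : ¬ (pvGetD t2 "role" == "system") = true := by simp [ht2]
              have hnu2 : ¬ (pvGetD t2 "role" == "user") = true := by simp [ht2]
              simp [pvStepB, ht2]
            have hrec := ih rest2 (by simp at hlen ⊢; omega)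
              (fun x hx => hsys x (by simp [hx]))
              ((p ++ [if f && pvSysTruthy sys then
                     "<s>[INST] " ++ sys.getD "" ++ "\n" ++ pvGetD t "content" ++ " [/INST]"
                   else
                     "<s>[INST] " ++ pvGetD t "content" ++ " [/INST]"]) ++
                  [" " ++ pvGetD t2 "content" ++ "</s>"])
              (if f && pvSysTruthy sys then false else f)
            simp only [List.foldl, hstep, hstep2, hrec, pvLoopA, hu, ha]
            simp
          · -- no assistant follows: the open flag dies at the next turn
            have ht2a : ¬ pvGetD t2 "role" = "assistant" := by simpa [beq_iff_eq] using ha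
            have ht2s : ¬ pvGetD t2 "role" = "system" := hsys t2 (by simp)
            have hopen : pvStepB sys
                (p ++ [if f && pvSysTruthy sys then
                     "<s>[INST] " ++ sys.getD "" ++ "\n" ++ pvGetD t "content" ++ " [/INST]"
                   else
                     "<s>[INST] " ++ pvGetD t "content" ++ " [/INST]"], true,
                  if f && pvSysTruthy sys then false else f) t2 =
                pvStepB sys
                (p ++ [if f && pvSysTruthy sys then
                     "<s>[INST] " ++ sys.getD "" ++ "\n" ++ pvGetD t "content" ++ " [/INST]"
                   else
                     "<s>[INST] " ++ pvGetD t "content" ++ " [/INST]"], false,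
                  if f && pvSysTruthy sys then false else f) t2 :=
              pvStepB_open_irrel sys t2 _ _ ht2a ht2s
            have hrec := ih (t2 :: rest2) (by simp at hlen ⊢; omega)
              (fun x hx => hsys x (by simp [hx]))
              (p ++ [if f && pvSysTruthy sys then
                     "<s>[INST] " ++ sys.getD "" ++ "\n" ++ pvGetD t "content" ++ " [/INST]"
                   else
                     "<s>[INST] " ++ pvGetD t "content" ++ " [/INST]"])
              (if f && pvSysTruthy sys then false else f)
            simp only [List.foldl] at hrec ⊢
            rw [hstep, hopen, hrec]
            simp [pvLoopA, hu, ha]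
      · -- other role with the block closed: both sides skip the turn
        have hstep : pvStepB sys (p, false, f) t = (p, false, f) := by
          have hns : ¬ (pvGetD t "role" == "system") = true := by
            simp [beq_iff_eq]; exact hts
          simp [pvStepB, hu, hns]
        have hrec := ih rest (by simp at hlen ⊢; omega)
          (fun x hx => hsys x (by simp [hx])) p f
        simp only [List.foldl, hstep, hrec]
        cases rest <;> simp [pvLoopA, hu]

-- ===== VERDICT (by name: the statement is the Claim_ definition above) =====
theorem build_manual_prompt_mistral_spec : Claim_equal_build_manual_prompt_mistral := by
  intro conversation system_prompt use_history _dom _pre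
  unfold Spec_build_manual_prompt_mistral
  unfold build_manual_prompt_mistral build_manual_prompt_mistral_alt
  cases use_history with
  | false =>
    simp only [Bool.not_false]
    rw [pvFindLastUser_eq_find?]
    by_cases h : pvSysTruthy system_prompt = true
    · simp [h, String.append_assoc]
    · simp [h]
  | true =>
    simp only [Bool.not_true, Bool.false_eq_true, if_false]
    rw [pvFoldB_filter]
    rw [pvFoldB_eq_loopA system_prompt
      (conversation.filter (fun t => !(pvGetD t "role" == "system"))).length _ le_rfl
      (by intro t ht; have := List.of_mem_filter ht; simpa [beq_iff_eq] using this)]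
    simp
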